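-- pv_equiv track=rewrite | github.com/kato420/PERSONAL | proyecto_final/proyecto_final.py | verificar_mov
-- ===== SOURCE A (Python) =====
-- def verificar_mov(l=list):
--     ver=0 ## Variable de verificacion
--     for x in l: # Itera en fila
--         for y in x: # Itera en columna
--             if y!="_": # cuenta espacios no vacíos
--                 ver+=1
--     a=42-ver
--     return a
-- ===== SOURCE B (Python) =====
-- def verificar_mov(l=list):
--     # Flatten the grid, build a histogram of cell contents in one pass,
--     # then read the answer off the histogram.
--     cells = [y for x in l for y in x]
--     freq = {}
--     for y in cells:
--         freq[y] = freq.get(y, 0) + 1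
--     return 42 - sum(v for k, v in freq.items() if k != "_")
-- ===== Notes on version B (the rewrite author's own statement) =====
-- stated objective: alternative
-- what changed: Instead of branching per cell and incrementing a counter, B flattens the grid, builds a frequency dictionary (histogram) of cell contents in one pass, and then sums the histogram entries for every key other than "_" to get the occupied-cell count subtracted from 42.
import Mathlib
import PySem

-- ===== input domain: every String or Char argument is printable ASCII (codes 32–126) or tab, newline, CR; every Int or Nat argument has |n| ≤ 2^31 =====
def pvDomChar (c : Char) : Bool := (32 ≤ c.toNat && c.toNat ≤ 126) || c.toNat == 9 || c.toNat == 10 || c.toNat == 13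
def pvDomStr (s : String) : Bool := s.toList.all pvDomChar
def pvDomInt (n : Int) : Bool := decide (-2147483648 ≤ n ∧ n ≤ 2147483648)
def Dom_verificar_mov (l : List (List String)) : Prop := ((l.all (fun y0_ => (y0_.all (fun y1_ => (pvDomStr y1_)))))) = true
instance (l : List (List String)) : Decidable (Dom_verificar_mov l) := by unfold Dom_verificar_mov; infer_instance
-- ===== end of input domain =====

-- B replaces A's per-cell branch-and-count with a flatten + frequency-dictionary (histogram) pass,
-- reading the answer off the histogram (alternative decomposition, same cost).

-- ===== PORT A =====
-- A: nested loops over rows and cells, increment ver on each non-"_" cell, return 42 - ver.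
def verificar_mov (l : List (List String)) : Int :=
  let ver : Int := l.foldl (fun ver x =>
    x.foldl (fun ver y => if y ≠ "_" then ver + 1 else ver) ver) 0
  42 - ver

-- ===== PORT B =====
-- B: cells = [y for x in l for y in x]; freq[y] = freq.get(y,0)+1; 42 - sum of values with key ≠ "_".
def verificar_mov_alt (l : List (List String)) : Int :=
  let cells : List String := l.flatMap (fun x => x)
  let freq : PySem.Dict String Int :=
    cells.foldl (fun d y => d.insert y (d.getD y 0 + 1)) PySem.Dict.empty
  42 - ((freq.items.filter (fun p => p.1 ≠ "_")).map (·.2)).sum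

-- ===== PRECONDITION & SPEC =====
def Spec_verificar_mov (l : List (List String)) (out : Int) : Prop := out = verificar_mov_alt l
instance (l : List (List String)) (out : Int) : Decidable (Spec_verificar_mov l out) := by unfold Spec_verificar_mov; infer_instance

-- ===== CLAIM (what is proved, stated in full; the proofs are below) =====
def Claim_equal_verificar_mov : Prop := ∀ (l : List (List String)), Dom_verificar_mov l → Spec_verificar_mov l (verificar_mov l)

-- ===== LEMMAS AND PROOFS =====

-- Sum of stored values over the non-"_" entries of an item list.
def pvS (its : List (String × Int)) : Int :=
  ((its.filter (fun p => p.1 ≠ "_")).map (·.2)).sum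

theorem pvS_append (a b : List (String × Int)) : pvS (a ++ b) = pvS a + pvS b := by
  simp [pvS, List.filter_append]

theorem map_keep (its : List (String × Int)) (y : String) (v : Int)
    (h : ∀ p ∈ its, p.1 ≠ y) :
    its.map (fun p => if p.1 == y then (y, v) else p) = its := by
  induction its with
  | nil => rfl
  | cons p t ih =>
    rw [List.map_cons, ih (fun q hq => h q (List.mem_cons_of_mem _ hq))]
    simp [h p (List.mem_cons_self ..)]

theorem pvS_repl (its : List (String × Int)) (y : String) (v : Int)
    (hn : (its.map (·.1)).Nodup) (hm : (y, v) ∈ its) :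
    pvS (its.map (fun p => if p.1 == y then (y, v + 1) else p))
      = pvS its + (if y = "_" then 0 else 1) := by
  induction its with
  | nil => simp at hm
  | cons p t ih =>
    simp only [List.map_cons, List.nodup_cons] at hn
    rcases List.mem_cons.mp hm with hp | ht
    · subst hp
      have hk : ∀ q ∈ t, q.1 ≠ y := by
        intro q hq h1
        exact hn.1 (List.mem_map.mpr ⟨q, hq, h1⟩)
      rw [List.map_cons, map_keep t y (v + 1) hk]
      by_cases hy : y = "_" <;> (simp [pvS, hy]; try ring)
    · have hpy : p.1 ≠ y := by
        intro h1
        exact hn.1 (h1 ▸ List.mem_map_of_mem ht)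
      rw [List.map_cons]
      simp only [beq_iff_eq, if_neg hpy]
      have := ih hn.2 ht
      by_cases hp1 : p.1 = "_" <;> simp [pvS, hp1] at this ⊢ <;> omega

theorem pvS_insert (d : PySem.Dict String Int) (y : String)
    (hn : d.keys.Nodup) :
    pvS ((d.insert y (d.getD y 0 + 1)).items)
      = pvS d.items + (if y = "_" then 0 else 1) := by
  by_cases hc : d.contains y = true
  · obtain ⟨v, hv⟩ : ∃ v, d.get? y = some v := by
      rw [PySem.Dict.contains_eq_isSome_get?] at hc
      exact Option.isSome_iff_exists.mp hc
    have hgd : d.getD y 0 = v := PySem.Dict.getD_of_get?_eq_some d 0 hv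
    have hmem : (y, v) ∈ d.items := PySem.Dict.mem_items_of_get?_eq_some d hv
    rw [PySem.Dict.items_insert_of_contains d _ hc, hgd]
    exact pvS_repl d.items y v hn hmem
  · have hc' : d.contains y = false := by simpa using hc
    rw [PySem.Dict.items_insert_of_not_contains d _ hc',
        PySem.Dict.getD_of_not_contains d 0 hc', pvS_append]
    by_cases hy : y = "_" <;> simp [pvS, hy]

theorem pvS_foldl (cs : List String) (d : PySem.Dict String Int)
    (hn : d.keys.Nodup) :
    pvS ((cs.foldl (fun d y => d.insert y (d.getD y 0 + 1)) d).items)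
      = pvS d.items + (cs.countP (fun y => y ≠ "_") : Int) := by
  induction cs generalizing d with
  | nil => simp
  | cons c t ih =>
    rw [List.foldl_cons, ih _ (PySem.Dict.nodup_keys_insert d c _ hn),
        pvS_insert d c hn, List.countP_cons]
    by_cases hc : c = "_" <;> (simp [hc]; try (push_cast; ring))

theorem inner_count (x : List String) (acc : Int) :
    x.foldl (fun ver y => if y ≠ "_" then ver + 1 else ver) acc
      = acc + (x.countP (fun y => y ≠ "_") : Int) := by
  induction x generalizing acc with
  | nil => simp
  | cons h t ih =>
    rw [List.foldl_cons, ih, List.countP_cons]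
    by_cases hh : h = "_" <;> (simp [hh]; try (push_cast; ring))

theorem outer_count (l : List (List String)) (acc : Int) :
    l.foldl (fun ver x => x.foldl (fun ver y => if y ≠ "_" then ver + 1 else ver) ver) acc
      = acc + ((l.flatMap (fun x => x)).countP (fun y => y ≠ "_") : Int) := by
  induction l generalizing acc with
  | nil => simp
  | cons h t ih =>
    rw [List.foldl_cons, inner_count, ih, List.flatMap_cons, List.countP_append]
    push_cast
    ring

-- ===== VERDICT (by name: the statement is the Claim_ definition above) =====
theorem verificar_mov_spec : Claim_equal_verificar_mov := by
  intro l _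
  unfold Spec_verificar_mov verificar_mov verificar_mov_alt
  show 42 - _ = 42 - pvS _
  rw [outer_count, pvS_foldl _ _ (by simp [pysem]), zero_add]
  simp [pvS, PySem.Dict.empty]
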